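-- pv_equiv track=rewrite | github.com/nliccini/knowledge-based-ta | classification/src/utils.py | remove_numerals
-- ===== SOURCE A (Python) =====
-- def convert_numerals(words):
--     numerals = ['first', 'second', 'third', 'fourth', 'fifth', 'sixth', 'seventh', 'eighth', 'ninth',
--                 'tenth', 'eleventh', 'twelfth', 'thirteenth', 'fourteenth', 'fifteenth', 'sixteenth']
--     spelled_out_numbers = ['one', 'two', 'three', 'four', 'five', 'six', 'seven', 'eight', 'nine',
--                            'ten', 'eleven', 'twelve', 'thirteen', 'fourteen', 'fifteen', 'sixteen']
--     numbers = ['1', '2', '3', '4', '5', '6', '7', '8', '9', '10', '11', '12', '13', '14', '15', '16']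
--     converted = []
--     i = 0
--     while i < len(words):
--         for j in range(len(numerals)):
--             if words[i] == spelled_out_numbers[j]:
--                 converted.append(numbers[j])
--                 break
--             if words[i] == numerals[j]:
--                 if i+1 < len(words):
--                     converted.append(words[i+1])
--                     i += 1
--                 converted.append(numbers[j])
--                 break
--         else:
--             converted.append(words[i])
--         i += 1
--     return converted
--
-- def remove_numerals(words):
--     words = convert_numerals(words)
--     numbers = ['1', '2', '3', '4', '5', '6', '7', '8', '9', '10', '11', '12', '13', '14', '15', '16']
--     out = []
--     for word in words:
--         if word not in numbers:
--             out.append(word)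
--     return out
-- ===== SOURCE B (Python) =====
-- def remove_numerals(words):
--     spelled = {'one', 'two', 'three', 'four', 'five', 'six', 'seven', 'eight', 'nine',
--                'ten', 'eleven', 'twelve', 'thirteen', 'fourteen', 'fifteen', 'sixteen'}
--     ordinals = {'first', 'second', 'third', 'fourth', 'fifth', 'sixth', 'seventh', 'eighth',
--                 'ninth', 'tenth', 'eleventh', 'twelfth', 'thirteenth', 'fourteenth',
--                 'fifteenth', 'sixteenth'}
--     digits = {str(k) for k in range(1, 17)}
--     out = []
--     i = 0
--     n = len(words)
--     while i < n:
--         w = words[i]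
--         if w in spelled:
--             pass
--         elif w in ordinals:
--             if i + 1 < n:
--                 nxt = words[i + 1]
--                 if nxt not in digits:
--                     out.append(nxt)
--                 i += 1
--         elif w not in digits:
--             out.append(w)
--         i += 1
--     return out
-- ===== Notes on version B (the rewrite author's own statement) =====
-- stated objective: faster
-- what changed: Collapses A's two passes (build an intermediate converted list, then filter digit tokens) into one indexed pass over words that never materialises the intermediate list, replacing the 16-element inner scan per word with set lookups.
import Mathlib
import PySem

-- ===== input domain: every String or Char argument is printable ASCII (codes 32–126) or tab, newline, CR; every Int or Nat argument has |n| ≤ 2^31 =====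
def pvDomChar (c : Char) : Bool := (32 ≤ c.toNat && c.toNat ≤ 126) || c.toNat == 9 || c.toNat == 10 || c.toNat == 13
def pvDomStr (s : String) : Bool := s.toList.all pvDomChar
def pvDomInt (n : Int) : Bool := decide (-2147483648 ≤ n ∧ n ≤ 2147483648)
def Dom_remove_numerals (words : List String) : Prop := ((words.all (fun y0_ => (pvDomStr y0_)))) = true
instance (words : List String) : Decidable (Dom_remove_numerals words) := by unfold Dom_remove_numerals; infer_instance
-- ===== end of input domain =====

-- B collapses A's two passes (convert to digits, then filter digit tokens) into one indexed pass; objective: simpler.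

-- ===== PORT A =====
def pyNumeralsA : List String :=
  ["first", "second", "third", "fourth", "fifth", "sixth", "seventh", "eighth", "ninth",
   "tenth", "eleventh", "twelfth", "thirteenth", "fourteenth", "fifteenth", "sixteenth"]
def pySpelledA : List String :=
  ["one", "two", "three", "four", "five", "six", "seven", "eight", "nine",
   "ten", "eleven", "twelve", "thirteen", "fourteen", "fifteen", "sixteen"]
def pyNumbersA : List String :=
  ["1", "2", "3", "4", "5", "6", "7", "8", "9", "10", "11", "12", "13", "14", "15", "16"]

-- result of A's inner 'for j' loop with break/else
inductive ScanRes where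
  | spelled (j : Nat)
  | ordinal (j : Nat)
  | nomatch
deriving DecidableEq, Repr

def innerScan (w : String) (j : Nat) : ScanRes :=
  if h : j < pyNumeralsA.length then
    if w == pySpelledA[j]! then .spelled j
    else if w == pyNumeralsA[j]! then .ordinal j
    else innerScan w (j + 1)
  else .nomatch
termination_by pyNumeralsA.length - j

-- A's while loop over i, accumulating 'converted'
def convLoop (words : List String) (i : Nat) (acc : List String) : List String :=
  if h : i < words.length then
    match innerScan words[i]! 0 with
    | .spelled j => convLoop words (i + 1) (acc ++ [pyNumbersA[j]!])
    | .ordinal j =>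
        if i + 1 < words.length then
          convLoop words (i + 2) (acc ++ [words[i + 1]!, pyNumbersA[j]!])
        else
          convLoop words (i + 1) (acc ++ [pyNumbersA[j]!])
    | .nomatch => convLoop words (i + 1) (acc ++ [words[i]!])
  else acc
termination_by words.length - i

def convert_numerals (words : List String) : List String := convLoop words 0 []

def remove_numerals (words : List String) : List String :=
  (convert_numerals words).foldl
    (fun out word => if pyNumbersA.contains word then out else out ++ [word]) []

-- ===== PORT B =====
def spelledB : PySem.Set String :=
  ["one", "two", "three", "four", "five", "six", "seven", "eight", "nine",
   "ten", "eleven", "twelve", "thirteen", "fourteen", "fifteen", "sixteen"]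
def ordinalsB : PySem.Set String :=
  ["first", "second", "third", "fourth", "fifth", "sixth", "seventh", "eighth", "ninth",
   "tenth", "eleventh", "twelfth", "thirteenth", "fourteenth", "fifteenth", "sixteenth"]
def digitsB : PySem.Set String :=
  ["1", "2", "3", "4", "5", "6", "7", "8", "9", "10", "11", "12", "13", "14", "15", "16"]

def altLoop (words : List String) (i : Nat) (out : List String) : List String :=
  if h : i < words.length then
    let w := words[i]!
    if PySem.Set.contains spelledB w then
      altLoop words (i + 1) out
    else if PySem.Set.contains ordinalsB w then
      if i + 1 < words.length then
        let nxt := words[i + 1]!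
        altLoop words (i + 2) (if PySem.Set.contains digitsB nxt then out else out ++ [nxt])
      else
        altLoop words (i + 1) out
    else if PySem.Set.contains digitsB w then
      altLoop words (i + 1) out
    else
      altLoop words (i + 1) (out ++ [w])
  else out
termination_by words.length - i

def remove_numerals_alt (words : List String) : List String := altLoop words 0 []

-- ===== PRECONDITION & SPEC =====
def Spec_remove_numerals (words : List String) (out : List String) : Prop := out = remove_numerals_alt words
instance (words : List String) (out : List String) : Decidable (Spec_remove_numerals words out) := by unfold Spec_remove_numerals; infer_instance

-- ===== CLAIM (what is proved, stated in full; the proofs are below) =====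
def Claim_equal_remove_numerals : Prop := ∀ (words : List String), Dom_remove_numerals words → Spec_remove_numerals words (remove_numerals words)

-- ===== LEMMAS AND PROOFS =====

def pvP (w : String) : Bool := !(pyNumbersA.contains w)

theorem foldl_skip_if (l acc : List String) :
    l.foldl (fun out w => if pyNumbersA.contains w then out else out ++ [w]) acc
      = acc ++ l.filter pvP := by
  induction l generalizing acc with
  | nil => simp
  | cons x xs ih =>
      rw [List.foldl_cons, List.filter_cons]
      cases hp : pvP x with
      | false =>
          have h : pyNumbersA.contains x = true := by
            unfold pvP at hp; simpa using hp
          rw [if_pos h, ih, if_neg (by simp [hp])]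
      | true =>
          have h : ¬ pyNumbersA.contains x = true := by
            unfold pvP at hp; simpa using hp
          rw [if_neg h, ih, if_pos (by simp [hp]), List.append_assoc]; rfl

-- the three Python sets equal (as lists) A's three literal lists
theorem digitsB_eq : digitsB = pyNumbersA := rfl
theorem spelledB_eq : spelledB = pySpelledA := rfl
theorem ordinalsB_eq : ordinalsB = pyNumeralsA := rfl

-- complete characterization of A's inner 'for j' loop (with break/else)
theorem innerScan_char (w : String) (j : Nat) :
      (innerScan w j = .nomatch ∧ ∀ k, j ≤ k → k < 16 → w ≠ pySpelledA[k]! ∧ w ≠ pyNumeralsA[k]!)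
    ∨ (∃ k, k < 16 ∧ innerScan w j = .spelled k ∧ w = pySpelledA[k]!)
    ∨ (∃ k, k < 16 ∧ innerScan w j = .ordinal k ∧ w = pyNumeralsA[k]!) := by
  induction j using innerScan.induct (w := w) with
  | case1 j h hsp =>
      right; left
      exact ⟨j, by simpa [pyNumeralsA] using h, by rw [innerScan, dif_pos h, if_pos hsp],
             by simpa using hsp⟩
  | case2 j h hsp hor =>
      right; right
      exact ⟨j, by simpa [pyNumeralsA] using h,
             by rw [innerScan, dif_pos h, if_neg hsp, if_pos hor], by simpa using hor⟩
  | case3 j h hsp hor ih =>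
      have hstep : innerScan w j = innerScan w (j + 1) := by
        rw [innerScan, dif_pos h, if_neg hsp, if_neg hor]
      rcases ih with ⟨hn, hall⟩ | ⟨k, hk, hs, hw⟩ | ⟨k, hk, hs, hw⟩
      · left
        refine ⟨hstep.trans hn, fun k hjk hk16 => ?_⟩
        rcases Nat.eq_or_lt_of_le hjk with rfl | hlt
        · exact ⟨by simpa using hsp, by simpa using hor⟩
        · exact hall k hlt hk16
      · exact Or.inr (Or.inl ⟨k, hk, hstep.trans hs, hw⟩)
      · exact Or.inr (Or.inr ⟨k, hk, hstep.trans hs, hw⟩)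
  | case4 j h =>
      left
      constructor
      · rw [innerScan, dif_neg h]
      · intro k hjk hk16
        exfalso
        simp [pyNumeralsA] at h
        omega

theorem not_mem_of_all_ne {w : String} {l : List String}
    (hall : ∀ k, k < l.length → w ≠ l[k]!) : w ∉ l := by
  intro hmem
  rcases List.mem_iff_getElem.mp hmem with ⟨n, hn, he⟩
  apply hall n hn
  rw [List.getElem!_eq_getElem?_getD, List.getElem?_eq_getElem hn]
  exact he.symm

theorem contains_false_of_not_mem {w : String} {l : List String} (h : w ∉ l) :
    PySem.Set.contains l w = false := by simpa using h

theorem filter_app_neg (acc : List String) {x : String} (h : pvP x = false) :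
    (acc ++ [x]).filter pvP = acc.filter pvP := by
  simp [List.filter_append, List.filter_singleton, h]

theorem filter_app_pos (acc : List String) {x : String} (h : pvP x = true) :
    (acc ++ [x]).filter pvP = acc.filter pvP ++ [x] := by
  simp [List.filter_append, List.filter_singleton, h]

theorem pvP_digit {k : Nat} (hk : k < 16) : pvP (pyNumbersA[k]!) = false := by
  interval_cases k <;> decide

theorem main_lemma (words : List String) : ∀ (d i : Nat) (acc out : List String),
    words.length - i ≤ d →
    acc.filter pvP = out →
    (convLoop words i acc).filter pvP = altLoop words i out := by
  intro d
  induction d with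
  | zero =>
      intro i acc out hle hacc
      have h : ¬ i < words.length := by omega
      rw [convLoop, altLoop, dif_neg h, dif_neg h]
      exact hacc
  | succ d ih =>
      intro i acc out hle hacc
      rw [convLoop, altLoop]
      by_cases h : i < words.length
      · rw [dif_pos h, dif_pos h]
        rcases innerScan_char words[i]! 0 with ⟨hscan, hall⟩ | ⟨k, hk, hscan, hw⟩ | ⟨k, hk, hscan, hw⟩
        · -- no match: A appends the word; B appends it unless it is a digit token
          rw [hscan]; dsimp only
          have hnsp : PySem.Set.contains spelledB words[i]! = false := by
            rw [spelledB_eq]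
            exact contains_false_of_not_mem (not_mem_of_all_ne
              (fun k hk => (hall k (Nat.zero_le k) (by simpa [pySpelledA] using hk)).1))
          have hnor : PySem.Set.contains ordinalsB words[i]! = false := by
            rw [ordinalsB_eq]
            exact contains_false_of_not_mem (not_mem_of_all_ne
              (fun k hk => (hall k (Nat.zero_le k) (by simpa [pyNumeralsA] using hk)).2))
          rw [hnsp, hnor]
          simp only [Bool.false_eq_true, if_false, digitsB_eq]
          by_cases hdig : pyNumbersA.contains words[i]! = true
          · rw [if_pos (by simpa using hdig)]
            refine ih (i + 1) (acc ++ [words[i]!]) out (by omega) ?_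
            rw [filter_app_neg acc (by unfold pvP; rw [hdig]; rfl)]
            exact hacc
          · rw [if_neg (by simpa using hdig)]
            refine ih (i + 1) (acc ++ [words[i]!]) (out ++ [words[i]!]) (by omega) ?_
            rw [filter_app_pos acc (by unfold pvP; rw [Bool.eq_false_iff.mpr hdig]; rfl), hacc]
        · -- spelled-out number: A appends its digit token (later filtered); B skips it
          rw [hscan, hw]; dsimp only
          have hsp : PySem.Set.contains spelledB pySpelledA[k]! = true := by
            rw [spelledB_eq]; interval_cases k <;> decide
          rw [hsp]
          simp only [if_true]
          refine ih (i + 1) (acc ++ [pyNumbersA[k]!]) out (by omega) ?_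
          rw [filter_app_neg acc (pvP_digit hk)]
          exact hacc
        · -- ordinal: A consumes the next word and appends its digit; B consumes it, filtered
          rw [hscan, hw]; dsimp only
          have hsp : PySem.Set.contains spelledB pyNumeralsA[k]! = false := by
            rw [spelledB_eq]; interval_cases k <;> decide
          have hor : PySem.Set.contains ordinalsB pyNumeralsA[k]! = true := by
            rw [ordinalsB_eq]; interval_cases k <;> decide
          rw [hsp, hor]
          simp only [Bool.false_eq_true, if_false, if_true, digitsB_eq]
          by_cases hnext : i + 1 < words.length
          · rw [if_pos hnext, if_pos hnext]
            have hsplit : acc ++ [words[i+1]!, pyNumbersA[k]!]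
                = (acc ++ [words[i+1]!]) ++ [pyNumbersA[k]!] := by
              rw [List.append_assoc]; rfl
            by_cases hd2 : pyNumbersA.contains words[i+1]! = true
            · rw [if_pos (by simpa using hd2)]
              refine ih (i + 2) (acc ++ [words[i+1]!, pyNumbersA[k]!]) out (by omega) ?_
              rw [hsplit, filter_app_neg _ (pvP_digit hk),
                  filter_app_neg acc (by unfold pvP; rw [hd2]; rfl)]
              exact hacc
            · rw [if_neg (by simpa using hd2)]
              refine ih (i + 2) (acc ++ [words[i+1]!, pyNumbersA[k]!]) (out ++ [words[i+1]!]) (by omega) ?_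
              rw [hsplit, filter_app_neg _ (pvP_digit hk),
                  filter_app_pos acc (by unfold pvP; rw [Bool.eq_false_iff.mpr hd2]; rfl), hacc]
          · rw [if_neg hnext, if_neg hnext]
            refine ih (i + 1) (acc ++ [pyNumbersA[k]!]) out (by omega) ?_
            rw [filter_app_neg acc (pvP_digit hk)]
            exact hacc
      · rw [dif_neg h, dif_neg h]
        exact hacc

-- ===== VERDICT (by name: the statement is the Claim_ definition above) =====
theorem remove_numerals_spec : Claim_equal_remove_numerals := by
  intro words _
  unfold Spec_remove_numerals remove_numerals remove_numerals_alt convert_numerals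
  rw [foldl_skip_if]
  simpa using main_lemma words words.length 0 [] [] (by omega) rfl
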